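-- pv_equiv track=rewrite | github.com/emeric254/grafana-cassandra-datasource | cassandra-gateway-server/src/handlers/QueryHandler.py | _aggregate_datapoint_changes
-- ===== SOURCE A (Python) =====
-- def _aggregate_datapoint_changes(entry_results):
--
--     last_value = None
--
--     new_datapoints = []
--
--     for (value, timestamp) in entry_results:
--
--         if value == last_value:
--             continue
--
--         new_datapoints.append([
--             value,
--             timestamp
--         ])
--
--         last_value = value
--
--     return new_datapoints
-- ===== SOURCE B (Python) =====
-- def _aggregate_datapoint_changes(entry_results):
--     # Group the list into maximal runs of consecutive equal values and
--     # emit [value, timestamp] of each run's first datapoint.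
--     out = []
--     n = len(entry_results)
--     i = 0
--     while i < n:
--         value, timestamp = entry_results[i]
--         out.append([value, timestamp])
--         # skip the rest of this run
--         i += 1
--         while i < n and entry_results[i][0] == value:
--             i += 1
--     return out
-- ===== Notes on version B (the rewrite author's own statement) =====
-- stated objective: alternative
-- what changed: Replaces A's single stateful pass (last_value accumulator filtering each element) with a manual groupby: an outer loop that emits the first datapoint of each maximal run of equal values and an inner loop that skips the remainder of the run.
import Mathlib
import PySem

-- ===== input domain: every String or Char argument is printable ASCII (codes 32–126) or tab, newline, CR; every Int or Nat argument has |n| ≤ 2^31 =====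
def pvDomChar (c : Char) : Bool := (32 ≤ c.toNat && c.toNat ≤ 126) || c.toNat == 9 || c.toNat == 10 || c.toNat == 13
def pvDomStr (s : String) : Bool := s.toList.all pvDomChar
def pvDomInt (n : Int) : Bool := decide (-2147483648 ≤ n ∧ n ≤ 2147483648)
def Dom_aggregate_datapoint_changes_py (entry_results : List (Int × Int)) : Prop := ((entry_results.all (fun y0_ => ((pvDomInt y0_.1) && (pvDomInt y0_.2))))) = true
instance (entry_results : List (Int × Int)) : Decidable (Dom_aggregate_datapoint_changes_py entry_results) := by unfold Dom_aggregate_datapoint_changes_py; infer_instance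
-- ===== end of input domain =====

-- B replaces A's stateful last-value filter pass by a manual groupby over maximal runs (alternative; same cost).


-- ===== PORT A =====
-- last_value : Option Int (None = none); `value == last_value` with last_value=None is False in Python,
-- ported as `some value = last_value`.
def aggregate_datapoint_changes_py (entry_results : List (Int × Int)) : List (List Int) :=
  (entry_results.foldl
    (fun (st : Option Int × List (List Int)) vt =>
      if some vt.1 = st.1 then st
      else (some vt.1, st.2 ++ [[vt.1, vt.2]]))
    (none, [])).2

-- ===== PORT B =====
-- B's outer loop body: emit the run's first datapoint, then the inner loop advances the index
-- past every following datapoint with the same value; the remaining suffix is the list minus the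
-- skipped prefix, which is exactly `dropWhile (·.1 == value)` of the rest.
def aggregate_datapoint_changes_py_alt (entry_results : List (Int × Int)) : List (List Int) :=
  match entry_results with
  | [] => []
  | (value, timestamp) :: rest =>
    [value, timestamp] ::
      aggregate_datapoint_changes_py_alt (rest.dropWhile (fun p => p.1 == value))
termination_by entry_results.length
decreasing_by
  simpa using Nat.lt_succ_of_le (List.length_dropWhile_le _ _)

-- ===== PRECONDITION & SPEC =====
def Spec_aggregate_datapoint_changes_py (entry_results : List (Int × Int)) (out : List (List Int)) : Prop := out = aggregate_datapoint_changes_py_alt entry_results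
instance (entry_results : List (Int × Int)) (out : List (List Int)) : Decidable (Spec_aggregate_datapoint_changes_py entry_results out) := by unfold Spec_aggregate_datapoint_changes_py; infer_instance

-- ===== CLAIM (what is proved, stated in full; the proofs are below) =====
def Claim_equal_aggregate_datapoint_changes_py : Prop := ∀ (entry_results : List (Int × Int)), Dom_aggregate_datapoint_changes_py entry_results → Spec_aggregate_datapoint_changes_py entry_results (aggregate_datapoint_changes_py entry_results)

-- ===== LEMMAS AND PROOFS =====

def pvStepA (st : Option Int × List (List Int)) (vt : Int × Int) : Option Int × List (List Int) :=
  if some vt.1 = st.1 then st else (some vt.1, st.2 ++ [[vt.1, vt.2]])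

-- A's loop, once the last emitted value is v, equals acc followed by B's run recursion on the
-- suffix with the current run of v dropped.
theorem pvLoopA (l : List (Int × Int)) : ∀ (v : Int) (acc : List (List Int)),
    (l.foldl pvStepA (some v, acc)).2
      = acc ++ aggregate_datapoint_changes_py_alt (l.dropWhile (fun p => p.1 == v)) := by
  induction l with
  | nil => intro v acc; rw [aggregate_datapoint_changes_py_alt.eq_def]; simp
  | cons wt rest ih =>
    intro v acc
    by_cases h : wt.1 = v
    · rw [List.foldl_cons, show pvStepA (some v, acc) wt = (some v, acc) from by
        simp [pvStepA, h]]
      rw [ih v acc, List.dropWhile_cons_of_pos (by simpa using h)]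
    · rw [List.foldl_cons, show pvStepA (some v, acc) wt = (some wt.1, acc ++ [[wt.1, wt.2]]) from by
        simp [pvStepA, h]]
      rw [ih wt.1 (acc ++ [[wt.1, wt.2]]), List.dropWhile_cons_of_neg (by simpa using h)]
      rw [show aggregate_datapoint_changes_py_alt (wt :: rest)
            = [wt.1, wt.2] :: aggregate_datapoint_changes_py_alt
                (rest.dropWhile (fun p => p.1 == wt.1)) from by
        rw [aggregate_datapoint_changes_py_alt]]
      simp

-- ===== VERDICT (by name: the statement is the Claim_ definition above) =====
theorem aggregate_datapoint_changes_py_spec : Claim_equal_aggregate_datapoint_changes_py := by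
  intro entry_results _
  unfold Spec_aggregate_datapoint_changes_py
  cases entry_results with
  | nil => rw [aggregate_datapoint_changes_py_alt.eq_def]; rfl
  | cons head rest =>
    show (((head :: rest).foldl pvStepA (none, [])).2) = _
    rw [List.foldl_cons, show pvStepA (none, []) head = (some head.1, [[head.1, head.2]]) from by
      simp [pvStepA]]
    rw [pvLoopA rest head.1 [[head.1, head.2]]]
    rw [show aggregate_datapoint_changes_py_alt (head :: rest)
          = [head.1, head.2] :: aggregate_datapoint_changes_py_alt
              (rest.dropWhile (fun p => p.1 == head.1)) from by
      rw [aggregate_datapoint_changes_py_alt]]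
    simp
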